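-- pv_equiv track=rewrite | github.com/mauricioklein/algorithm-exercises | challenge-62/solver.py | helper
-- ===== SOURCE A (Python) =====
-- def helper(word, k, left, right):
--   while left < right:
--     if word[left] != word[right]:
--       """ No more removals left: not a solution """
--       if k == 0:
--         return False
--
--       """
--       Recurse...
--         - Removing the left most char  (l)
--         - Removing the right most char (r)
--       """
--       l = helper(word, k - 1, left + 1, right    )
--       r = helper(word, k - 1, left    , right - 1)
--
--       return l or r
--
--     left += 1
--     right -= 1
--
--   """ Found a palindrome """
--   return True
-- ===== SOURCE B (Python) =====
-- def helper(word, k, left, right):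
--     # Interval DP: minimal deletions to make word[left..right] a palindrome, then compare to k.
--     if right <= left:
--         return True
--     n = right - left + 1
--     prev = [0] * (n + 1)          # prev[b] = min deletions for offsets a+1 .. b
--     for a in range(n - 1, -1, -1):
--         cur = [0] * (n + 1)
--         for b in range(a + 1, n):
--             if word[left + a] == word[left + b]:
--                 cur[b] = prev[b - 1]
--             else:
--                 cur[b] = 1 + min(prev[b], cur[b - 1])
--         prev = cur
--     return prev[n - 1] <= k
-- ===== Notes on version B (the rewrite author's own statement) =====
-- stated objective: alternative
-- what changed: Replaced A's branching try-both-deletions recursion by a bottom-up interval dynamic program that computes the minimum number of deletions needed to make word[left..right] a palindrome and compares it with k.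
-- outside the precondition, e.g. on helper('ab', -1, 0, 1): A returns True, B returns False
import Mathlib
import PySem

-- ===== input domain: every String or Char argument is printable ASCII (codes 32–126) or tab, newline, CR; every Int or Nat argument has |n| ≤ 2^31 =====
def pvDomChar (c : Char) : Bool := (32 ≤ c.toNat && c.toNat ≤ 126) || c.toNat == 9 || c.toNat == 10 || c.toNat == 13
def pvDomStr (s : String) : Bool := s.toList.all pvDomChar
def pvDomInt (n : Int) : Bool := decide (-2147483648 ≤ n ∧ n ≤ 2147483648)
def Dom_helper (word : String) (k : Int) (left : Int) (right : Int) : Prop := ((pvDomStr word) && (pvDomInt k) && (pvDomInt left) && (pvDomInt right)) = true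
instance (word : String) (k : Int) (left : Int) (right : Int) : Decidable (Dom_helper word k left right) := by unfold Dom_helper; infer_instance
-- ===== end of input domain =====

-- B computes the minimum number of deletions needed to make word[left..right] a palindrome by a
-- bottom-up interval DP and compares it with k, instead of A's branching recursion that tries
-- deleting at either end (objective: alternative).

-- ===== PORT A =====
def helper (word : String) (k : Int) (left : Int) (right : Int) : Bool :=
  if _h : left < right then
    if PySem.Str.pyGet? word left = PySem.Str.pyGet? word right then
      -- the two characters match: the while loop advances (left += 1; right -= 1)
      helper word k (left + 1) (right - 1)
    else if k = 0 then
      false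
    else
      let l := helper word (k - 1) (left + 1) right
      let r := helper word (k - 1) left (right - 1)
      l || r
  else
    true
termination_by (right - left).toNat
decreasing_by all_goals omega

-- ===== PORT B =====
def helper_alt (word : String) (k : Int) (left : Int) (right : Int) : Bool :=
  if right ≤ left then
    true
  else
    let n : Int := right - left + 1
    let prev : List Int := List.replicate (n + 1).toNat 0
    let prev := (PySem.List.pyRange (n - 1) (-1) (-1)).foldl (fun prev a =>
      let cur : List Int := List.replicate (n + 1).toNat 0
      let cur := (PySem.List.pyRange (a + 1) n 1).foldl (fun cur b =>
        let v : Int :=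
          if PySem.Str.pyGet? word (left + a) = PySem.Str.pyGet? word (left + b) then
            PySem.List.pyGetD prev (b - 1) 0
          else
            1 + min (PySem.List.pyGetD prev b 0) (PySem.List.pyGetD cur (b - 1) 0)
        cur.set b.toNat v) cur
      cur) prev
    decide (PySem.List.pyGetD prev (n - 1) 0 ≤ k)

-- ===== PRECONDITION & SPEC =====
-- Pre_ excludes (a) negative deletion budgets k < 0 on a non-trivial range (outside the natural
-- domain: A's `k == 0` test never fires there and it answers True even when deletions are needed,
-- an artifact of its implementation), and (b) ranges whose endpoints fall outside Python's index
-- range, on which A raises IndexError.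
def Pre_helper (word : String) (k : Int) (left : Int) (right : Int) : Prop :=
  left < right → (0 ≤ k ∧ -(PySem.Str.len word) ≤ left ∧ right < PySem.Str.len word)
instance (word : String) (k : Int) (left : Int) (right : Int) : Decidable (Pre_helper word k left right) := by unfold Pre_helper; infer_instance

def pvWitness_helper : String × Int × Int × Int := ("abca", 1, 0, 3)

def Spec_helper (word : String) (k : Int) (left : Int) (right : Int) (out : Bool) : Prop := out = helper_alt word k left right
instance (word : String) (k : Int) (left : Int) (right : Int) (out : Bool) : Decidable (Spec_helper word k left right out) := by unfold Spec_helper; infer_instance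

-- ===== CLAIM (what is proved, stated in full; the proofs are below) =====
def Claim_equal_helper : Prop := ∀ (word : String) (k : Int) (left : Int) (right : Int), Dom_helper word k left right → Pre_helper word k left right → Spec_helper word k left right (helper word k left right)

-- ===== LEMMAS AND PROOFS =====

-- Specification function: minimal number of single-character deletions turning the (Python-indexed)
-- range word[i..j] into a palindrome; 0 on an empty or one-character range.
def pvM (s : List Char) (i j : Int) : Nat :=
  if j ≤ i then 0
  else if PySem.List.pyGet? s i = PySem.List.pyGet? s j then
    pvM s (i + 1) (j - 1)
  else
    1 + min (pvM s (i + 1) j) (pvM s i (j - 1))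
termination_by (j - i).toNat
decreasing_by all_goals omega

-- A computes `pvM ≤ k` (for 0 ≤ k), by induction on the width of the range.
lemma helper_eq_pvM (word : String) : ∀ (N : Nat) (k l r : Int), (r - l).toNat ≤ N → 0 ≤ k →
    helper word k l r = decide ((pvM word.toList l r : Int) ≤ k) := by
  intro N
  induction N with
  | zero =>
    intro k l r h hk
    have hlr : ¬ l < r := by omega
    rw [helper, pvM, dif_neg hlr, if_pos (show r ≤ l by omega)]
    simp [hk]
  | succ N ih =>
    intro k l r h hk
    by_cases hlr : l < r
    · rw [helper, pvM, dif_pos hlr, if_neg (show ¬ r ≤ l by omega)]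
      by_cases hc : PySem.Str.pyGet? word l = PySem.Str.pyGet? word r
      · have hc' : PySem.List.pyGet? word.toList l = PySem.List.pyGet? word.toList r := by
          simpa [PySem.Str.pyGet?] using hc
        rw [if_pos hc, if_pos hc']
        exact ih k (l + 1) (r - 1) (by omega) hk
      · have hc' : ¬ PySem.List.pyGet? word.toList l = PySem.List.pyGet? word.toList r := by
          simpa [PySem.Str.pyGet?] using hc
        rw [if_neg hc, if_neg hc']
        by_cases hk0 : k = 0
        · subst hk0
          rw [if_pos rfl]
          symm
          rw [decide_eq_false_iff_not]
          push_cast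
          intro hcon
          have h1 : (0:Int) ≤ min ((pvM word.toList (l + 1) r : Nat) : Int) ((pvM word.toList l (r - 1) : Nat) : Int) :=
            le_min (Int.natCast_nonneg _) (Int.natCast_nonneg _)
          linarith
        · rw [if_neg hk0]
          show (helper word (k - 1) (l + 1) r || helper word (k - 1) l (r - 1)) = _
          rw [ih (k - 1) (l + 1) r (by omega) (by omega), ih (k - 1) l (r - 1) (by omega) (by omega)]
          have heq : (pvM word.toList (l + 1) r : Int) ≤ k - 1 ∨ (pvM word.toList l (r - 1) : Int) ≤ k - 1 ↔
              ((1 + min (pvM word.toList (l + 1) r) (pvM word.toList l (r - 1)) : Nat) : Int) ≤ k := by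
            push_cast
            omega
          have decor : ∀ (P Q : Prop) (_ : Decidable P) (_ : Decidable Q),
              (decide P || decide Q) = decide (P ∨ Q) := by
            intro P Q dP dQ
            by_cases hP : P <;> by_cases hQ : Q <;> simp [hP, hQ]
          rw [decor _ _ inferInstance inferInstance, decide_eq_decide.mpr heq]
    · rw [helper, pvM, dif_neg hlr, if_pos (show r ≤ l by omega)]
      simp [hk]

-- Row invariant for B's DP: `row` is row `a` (entries for offsets b < n hold the minimal
-- deletions for the offset range a..b of word[left..]).
def pvRow (s : List Char) (left n a : Int) (row : List Int) : Prop :=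
  row.length = (n + 1).toNat ∧
  ∀ b : Int, 0 ≤ b → b < n → row.getD b.toNat 0 = (pvM s (left + a) (left + b) : Nat)

lemma pvRow_replicate_top (s : List Char) (left n a : Int) (hn : n ≤ a) :
    pvRow s left n a (List.replicate (n + 1).toNat 0) := by
  refine ⟨by simp, ?_⟩
  intro b hb0 hbn
  rw [pvM]
  simp [show left + b ≤ left + a by omega]

-- Inner loop: filling row `a` left to right, given row `a+1` in `prev`.
lemma inner_fold (word : String) (left n a : Int) (prev : List Int)
    (hprev : pvRow word.toList left n (a + 1) prev) (ha : 0 ≤ a) :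
    ∀ (N : Nat) (m : Int) (cur : List Int), a < m → m ≤ n → (n - m).toNat ≤ N →
      cur.length = (n + 1).toNat →
      (∀ b : Int, 0 ≤ b → b < m → cur.getD b.toNat 0 = (pvM word.toList (left + a) (left + b) : Nat)) →
      pvRow word.toList left n a
        ((PySem.List.pyRange m n 1).foldl (fun cur b =>
          let v : Int :=
            if PySem.Str.pyGet? word (left + a) = PySem.Str.pyGet? word (left + b) then
              PySem.List.pyGetD prev (b - 1) 0
            else
              1 + min (PySem.List.pyGetD prev b 0) (PySem.List.pyGetD cur (b - 1) 0)
          cur.set b.toNat v) cur) := by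
  intro N
  induction N with
  | zero =>
    intro m cur ham hmn hN hlen hcur
    have : n = m := by omega
    subst this
    rw [PySem.List.pyRange_one_eq_nil (by omega)]
    exact ⟨hlen, fun b hb0 hbn => hcur b hb0 hbn⟩
  | succ N ih =>
    intro m cur ham hmn hN hlen hcur
    by_cases hmn' : m < n
    · rw [PySem.List.pyRange_one_cons hmn']
      simp only [List.foldl_cons]
      -- the value written at offset m is the minimal deletion count for offsets a..m
      have hm0 : 0 ≤ m := by omega
      have hmlen : m.toNat < cur.length := by rw [hlen]; omega
      have hval :
          (if PySem.Str.pyGet? word (left + a) = PySem.Str.pyGet? word (left + m) then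
            PySem.List.pyGetD prev (m - 1) 0
          else
            1 + min (PySem.List.pyGetD prev m 0) (PySem.List.pyGetD cur (m - 1) 0)) =
          (pvM word.toList (left + a) (left + m) : Nat) := by
        rw [pvM]
        have hne : ¬ left + m ≤ left + a := by omega
        by_cases hc : PySem.List.pyGet? word.toList (left + a) = PySem.List.pyGet? word.toList (left + m)
        · have hc2 : PySem.Str.pyGet? word (left + a) = PySem.Str.pyGet? word (left + m) := by
            simpa [PySem.Str.pyGet?] using hc
          rw [if_pos hc2, if_neg hne, if_pos hc]
          rw [PySem.List.pyGetD_of_nonneg prev 0 (by omega : (0:Int) ≤ m - 1)]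
          have hp := hprev.2 (m - 1) (by omega) (by omega)
          rw [show left + (a + 1) = left + a + 1 by ring, show left + (m - 1) = left + m - 1 by ring] at hp
          rw [hp]
        · have hc2 : ¬ PySem.Str.pyGet? word (left + a) = PySem.Str.pyGet? word (left + m) := by
            simpa [PySem.Str.pyGet?] using hc
          rw [if_neg hc2, if_neg hne, if_neg hc]
          rw [PySem.List.pyGetD_of_nonneg prev 0 (by omega : (0:Int) ≤ m),
            PySem.List.pyGetD_of_nonneg cur 0 (by omega : (0:Int) ≤ m - 1)]
          rw [hprev.2 m (by omega) (by omega), hcur (m - 1) (by omega) (by omega)]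
          have h1 : left + (a + 1) = left + a + 1 := by ring
          have h2 : left + (m - 1) = left + m - 1 := by ring
          rw [h1, h2]
          push_cast
          omega
      rw [hval]
      refine ih (m + 1) _ (by omega) (by omega) (by omega) (by simpa using hlen) ?_
      intro b hb0 hbm
      by_cases hbm' : b = m
      · subst hbm'
        simp [List.getD, hmlen]
      · have hne' : m.toNat ≠ b.toNat := by omega
        have h2 := hcur b hb0 (by omega)
        simp only [List.getD] at h2 ⊢
        rw [List.getElem?_set_ne hne']
        exact h2
    · have : n = m := by omega
      subst this
      rw [PySem.List.pyRange_one_eq_nil (by omega)]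
      exact ⟨hlen, fun b hb0 hbn => hcur b hb0 hbn⟩

-- Outer loop: rows n-1 down to 0.
lemma outer_fold (word : String) (left n : Int) :
    ∀ (N : Nat) (a : Int) (prev : List Int), -1 ≤ a → a ≤ n - 1 → (a + 1).toNat ≤ N →
      pvRow word.toList left n (a + 1) prev →
      pvRow word.toList left n 0
        ((PySem.List.pyRange a (-1) (-1)).foldl (fun prev a =>
          (PySem.List.pyRange (a + 1) n 1).foldl (fun cur b =>
            let v : Int :=
              if PySem.Str.pyGet? word (left + a) = PySem.Str.pyGet? word (left + b) then
                PySem.List.pyGetD prev (b - 1) 0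
              else
                1 + min (PySem.List.pyGetD prev b 0) (PySem.List.pyGetD cur (b - 1) 0)
            cur.set b.toNat v) (List.replicate (n + 1).toNat 0)) prev) := by
  intro N
  induction N with
  | zero =>
    intro a prev ha1 han hN hprev
    have : a = -1 := by omega
    subst this
    rw [PySem.List.pyRange_neg_one_eq_nil (by omega)]
    simpa using hprev
  | succ N ih =>
    intro a prev ha1 han hN hprev
    by_cases ha0 : 0 ≤ a
    · rw [PySem.List.pyRange_neg_one_cons (by omega : (-1:Int) < a)]
      simp only [List.foldl_cons]
      refine ih (a - 1) _ (by omega) (by omega) (by omega) ?_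
      have hcur0 : ∀ b : Int, 0 ≤ b → b < a + 1 →
          (List.replicate (n + 1).toNat (0:Int)).getD b.toNat 0 = (pvM word.toList (left + a) (left + b) : Nat) := by
        intro b hb0 hba
        rw [pvM]
        simp [show left + b ≤ left + a by omega]
      have := inner_fold word left n a prev hprev ha0 (n - (a + 1)).toNat (a + 1)
        (List.replicate (n + 1).toNat 0) (by omega) (by omega) (by omega) (by simp) hcur0
      simpa [show a - 1 + 1 = a by ring] using this
    · have : a = -1 := by omega
      subst this
      rw [PySem.List.pyRange_neg_one_eq_nil (by omega)]
      simpa using hprev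

-- B computes `pvM ≤ k` on a non-trivial range.
lemma helper_alt_eq_pvM (word : String) (k left right : Int) (h : left < right) :
    helper_alt word k left right = decide ((pvM word.toList left right : Int) ≤ k) := by
  have h' : ¬ right ≤ left := by omega
  obtain ⟨hlen, hval⟩ := outer_fold word left (right - left + 1) (right - left + 1).toNat
    (right - left + 1 - 1) (List.replicate (right - left + 1 + 1).toNat 0)
    (by omega) (by omega) (by omega)
    (pvRow_replicate_top word.toList left (right - left + 1) (right - left + 1 - 1 + 1) (by omega))
  have hval' := hval (right - left + 1 - 1) (by omega) (by omega)
  rw [show left + 0 = left by ring, show left + (right - left + 1 - 1) = right by ring] at hval'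
  rw [helper_alt, if_neg h']
  show decide (PySem.List.pyGetD _ (right - left + 1 - 1) 0 ≤ k) = decide ((pvM word.toList left right : Int) ≤ k)
  rw [PySem.List.pyGetD_of_nonneg _ 0 (by omega : (0:Int) ≤ right - left + 1 - 1), hval']

-- ===== VERDICT (by name: the statement is the Claim_ definition above) =====
theorem helper_spec : Claim_equal_helper := by
  intro word k left right _hdom hpre
  unfold Spec_helper
  by_cases h : left < right
  · obtain ⟨hk, -, -⟩ := hpre h
    rw [helper_alt_eq_pvM word k left right h]
    exact helper_eq_pvM word (right - left).toNat k left right (le_refl _) hk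
  · rw [helper, helper_alt]
    simp [h, show right ≤ left by omega]
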